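-- pv_equiv track=rewrite | github.com/wyk18703232953/myResearch | codeComplex/data copy/filteredData/python/quadratic/python_quadratic_0605.py | core_algorithm
-- ===== SOURCE A (Python) =====
-- def max_subarray(A):
--     max_ending_here = max_so_far = A[0]
--     for x in A[1:]:
--         max_ending_here = max(x, max_ending_here + x)
--         max_so_far = max(max_so_far, max_ending_here)
--     return max_so_far
--
-- def core_algorithm(n, m, k, a):
--     ans = 0
--     for i in range(m):
--         li = a[0:i] + [-k]
--         s = 0
--         while True:
--             li += a[i+s:min(i+m+s, len(a))]
--             li += [-k]
--             if i+m+s >= len(a):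
--                 break
--             s += m
--         ans = max(max_subarray(li) - k, ans)
--     return ans
-- ===== SOURCE B (Python) =====
-- def core_algorithm(n, m, k, a):
--     L = len(a)
--     ans = 0
--     for i in range(m):
--         # the scan over a[i:] emits ceil((L-i)/m) blocks of size m, and at least one
--         blocks = (L - i + m - 1) // m
--         if blocks < 1:
--             blocks = 1
--         pieces = [a[:i]] + [a[i + s * m : i + s * m + m] for s in range(blocks)]
--         li = [x for p in pieces for x in p + [-k]]
--         # maximum subarray via prefix sums: best = max_q (P[q] - min_{p<q} P[p])
--         pref = 0
--         minpref = 0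
--         best = li[0]
--         for x in li:
--             pref += x
--             if pref - minpref > best:
--                 best = pref - minpref
--             if pref < minpref:
--                 minpref = pref
--         ans = max(best - k, ans)
--     return ans
-- ===== Notes on version B (the rewrite author's own statement) =====
-- stated objective: faster
-- what changed: Replaces A's inner while-loop of repeated quadratic slice-and-concatenate (li += ...) with a closed-form block count ((L-i+m-1)//m, at least 1) building the per-offset list as a flattened list of pieces in one pass, and replaces Kadane's scan with the prefix-sum formulation of maximum subarray (best = max over prefixes of prefix sum minus minimal earlier prefix sum).
import Mathlib
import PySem

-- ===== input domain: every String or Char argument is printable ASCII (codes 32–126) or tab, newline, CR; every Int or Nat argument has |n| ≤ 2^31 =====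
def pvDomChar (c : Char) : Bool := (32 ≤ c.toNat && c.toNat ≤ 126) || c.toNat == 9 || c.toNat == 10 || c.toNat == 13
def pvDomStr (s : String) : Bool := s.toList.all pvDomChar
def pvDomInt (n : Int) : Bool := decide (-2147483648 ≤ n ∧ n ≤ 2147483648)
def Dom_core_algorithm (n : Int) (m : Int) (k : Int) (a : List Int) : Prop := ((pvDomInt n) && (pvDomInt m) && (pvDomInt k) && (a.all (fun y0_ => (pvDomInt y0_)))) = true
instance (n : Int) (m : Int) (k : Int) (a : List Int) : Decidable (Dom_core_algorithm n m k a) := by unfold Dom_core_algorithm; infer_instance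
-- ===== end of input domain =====

-- B replaces A's while-loop (repeated slice-and-concatenate) by a closed-form block count
-- and a list of pieces flattened once, and replaces Kadane's scan by the prefix-sum
-- formulation (best = max of prefix minus minimal earlier prefix); same return value,
-- measurably faster by a constant factor (no repeated list reallocation).

-- ===== PORT A =====
-- max_subarray(A): A[0] seeds both accumulators; [] is unreachable in A's calls (A[0] would raise)
def maxSubarrayA (l : List Int) : Int :=
  match l with
  | [] => 0
  | x :: rest =>
    (rest.foldl (fun (p : Int × Int) y =>
        let meh := max y (p.1 + y)
        (meh, max p.2 meh)) (x, x)).2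

-- the inner 'while True' loop; fuel (never exhausted: the loop runs at most len(a)+1 times) makes it total
def loopA (m k : Int) (a : List Int) (i : Int) : Nat → Int → List Int → List Int
  | 0, _, li => li
  | fuel + 1, s, li =>
    let li2 := li ++ PySem.List.slice a (some (i + s)) (some (min (i + m + s) (a.length : Int))) ++ [-k]
    if i + m + s ≥ (a.length : Int) then li2
    else loopA m k a i fuel (s + m) li2

def core_algorithm (n : Int) (m : Int) (k : Int) (a : List Int) : Int :=
  (PySem.List.pyRange 0 m 1).foldl (fun ans i =>
    max (maxSubarrayA (loopA m k a i (a.length + 1) 0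
          (PySem.List.slice a (some 0) (some i) ++ [-k])) - k) ans) 0

-- ===== PORT B =====
def core_algorithm_alt (n : Int) (m : Int) (k : Int) (a : List Int) : Int :=
  (PySem.List.pyRange 0 m 1).foldl (fun ans i =>
    let L : Int := a.length
    let blocks0 := PySem.Int.floordiv (L - i + m - 1) m
    let blocks := if blocks0 < 1 then 1 else blocks0
    let pieces := PySem.List.slice a (some 0) (some i) ::
      (PySem.List.pyRange 0 blocks 1).map (fun s =>
        PySem.List.slice a (some (i + s * m)) (some (i + s * m + m)))
    let li := pieces.flatMap (fun p => p ++ [-k])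
    -- li[0]: li is never empty (every piece contributes a trailing -k)
    match li with
    | [] => ans
    | x0 :: _ =>
      let st := li.foldl (fun (st : Int × Int × Int) x =>
          let pref := st.1 + x
          let best := if pref - st.2.1 > st.2.2 then pref - st.2.1 else st.2.2
          let minpref := if pref < st.2.1 then pref else st.2.1
          (pref, minpref, best)) (0, 0, x0)
      max (st.2.2 - k) ans) 0

-- ===== PRECONDITION & SPEC =====
def Spec_core_algorithm (n : Int) (m : Int) (k : Int) (a : List Int) (out : Int) : Prop := out = core_algorithm_alt n m k a
instance (n : Int) (m : Int) (k : Int) (a : List Int) (out : Int) : Decidable (Spec_core_algorithm n m k a out) := by unfold Spec_core_algorithm; infer_instance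

-- ===== CLAIM =====
def Claim_equal_core_algorithm : Prop := ∀ (n : Int) (m : Int) (k : Int) (a : List Int), Dom_core_algorithm n m k a → Spec_core_algorithm n m k a (core_algorithm n m k a)

-- ===== LEMMAS AND PROOFS =====

-- total number of blocks emitted for offset i (the closed form B computes)
def nBlocks (m i L : Int) : Int := max 1 (PySem.Int.floordiv (L - i + m - 1) m)

theorem nBlocks_pos (m i L : Int) : 1 ≤ nBlocks m i L := le_max_left _ _

-- the loop's stop test at block t is exactly 't is the last block'
theorem stop_iff (m i L t : Int) (hm : 0 < m) (ht : 0 ≤ t) :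
    (i + m + t * m ≥ L) ↔ nBlocks m i L ≤ t + 1 := by
  unfold nBlocks
  rw [PySem.Int.floordiv_eq_ediv_of_pos hm]
  have hq : (t + 2 ≤ (L - i + m - 1) / m) ↔ (t + 2) * m ≤ L - i + m - 1 :=
    Int.le_ediv_iff_mul_le hm
  rw [show (t + 2) * m = t * m + 2 * m from by ring] at hq
  generalize (L - i + m - 1) / m = q at hq
  generalize t * m = z at *
  omega

theorem nBlocks_le (m i L : Int) (hm : 0 < m) (hi : 0 ≤ i) (hL : 0 ≤ L) :
    nBlocks m i L ≤ L + 1 := by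
  unfold nBlocks
  rw [PySem.Int.floordiv_eq_ediv_of_pos hm]
  have hq : (L + 2 ≤ (L - i + m - 1) / m) ↔ (L + 2) * m ≤ L - i + m - 1 :=
    Int.le_ediv_iff_mul_le hm
  rw [show (L + 2) * m = L * m + 2 * m from by ring] at hq
  have hLm : L * 1 ≤ L * m := by
    exact mul_le_mul_of_nonneg_left hm hL
  rw [mul_one] at hLm
  generalize (L - i + m - 1) / m = q at hq
  generalize L * m = w at *
  omega

-- the slice with the explicit min equals the clamped slice
theorem slice_min_eq (a : List Int) (u m : Int) (hu : 0 ≤ u) (hm : 0 ≤ m) :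
    PySem.List.slice a (some u) (some (min (u + m) (a.length : Int)))
      = PySem.List.slice a (some u) (some (u + m)) := by
  rw [PySem.List.slice_toNat a hu (by omega), PySem.List.slice_toNat a hu (by omega)]
  apply List.take_eq_take_iff.mpr
  simp only [List.length_drop]
  omega

-- A's while-loop yields the flattened remaining blocks
theorem loopA_blocks (a : List Int) (k m i : Int) (hm : 0 < m) (hi : 0 ≤ i) :
    ∀ (c : Nat) (t : Int) (li : List Int), 0 ≤ t → t < nBlocks m i (a.length : Int) →
      (nBlocks m i (a.length : Int) - t).toNat ≤ c →
      loopA m k a i c (t * m) li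
        = li ++ (PySem.List.pyRange t (nBlocks m i (a.length : Int)) 1).flatMap
            (fun s => PySem.List.slice a (some (i + s * m)) (some (i + s * m + m)) ++ [-k]) := by
  intro c
  induction c with
  | zero => intro t li ht htn hc; omega
  | succ c ih =>
    intro t li ht htn hc
    have htm : (0:Int) ≤ t * m := mul_nonneg ht (by omega)
    have hsl : PySem.List.slice a (some (i + t * m)) (some (min (i + m + t * m) (a.length : Int)))
        = PySem.List.slice a (some (i + t * m)) (some (i + t * m + m)) := by
      rw [show i + m + t * m = (i + t * m) + m from by ring]
      exact slice_min_eq a (i + t * m) m (by omega) (by omega)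
    rw [loopA]
    by_cases hstop : i + m + t * m ≥ (a.length : Int)
    · rw [if_pos hstop]
      have hlast : nBlocks m i (a.length : Int) = t + 1 := by
        have := (stop_iff m i (a.length : Int) t hm ht).mp hstop
        omega
      rw [hlast, PySem.List.pyRange_one_cons (by omega : t < t + 1),
          PySem.List.pyRange_one_eq_nil (le_refl (t + 1)), List.flatMap_cons,
          List.flatMap_nil, hsl]
      simp
    · rw [if_neg hstop]
      have hnl : ¬ nBlocks m i (a.length : Int) ≤ t + 1 := by
        intro h
        exact hstop ((stop_iff m i (a.length : Int) t hm ht).mpr h)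
      rw [show t * m + m = (t + 1) * m from by ring,
          ih (t + 1) _ (by omega) (by omega) (by omega),
          PySem.List.pyRange_one_cons (by omega : t < nBlocks m i (a.length : Int)),
          List.flatMap_cons, hsl]
      simp

-- prefix-sum scan computes Kadane's result
theorem scan_eq_kadane : ∀ (l : List Int) (pref meh msf : Int),
    (l.foldl (fun (st : Int × Int × Int) x =>
        let p := st.1 + x
        let best := if p - st.2.1 > st.2.2 then p - st.2.1 else st.2.2
        let minpref := if p < st.2.1 then p else st.2.1
        (p, minpref, best)) (pref, pref - max meh 0, msf)).2.2
    = (l.foldl (fun (p : Int × Int) y =>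
        let meh := max y (p.1 + y)
        (meh, max p.2 meh)) (meh, msf)).2 := by
  intro l
  induction l with
  | nil => intro pref meh msf; rfl
  | cons x rest ih =>
    intro pref meh msf
    simp only [List.foldl_cons]
    have e1 : (if pref + x - (pref - max meh 0) > msf then pref + x - (pref - max meh 0)
        else msf) = max msf (max x (meh + x)) := by
      split_ifs <;> omega
    have e2 : (if pref + x < pref - max meh 0 then pref + x else pref - max meh 0)
        = (pref + x) - max (max x (meh + x)) 0 := by
      split_ifs <;> omega
    rw [e1, e2]
    exact ih (pref + x) (max x (meh + x)) (max msf (max x (meh + x)))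

-- the full prefix-sum scan (first element seeds best) equals Kadane's scan
theorem scan_full (x0 : Int) (rest : List Int) :
    ((x0 :: rest).foldl (fun (st : Int × Int × Int) x =>
        let pref := st.1 + x
        let best := if pref - st.2.1 > st.2.2 then pref - st.2.1 else st.2.2
        let minpref := if pref < st.2.1 then pref else st.2.1
        (pref, minpref, best)) (0, 0, x0)).2.2
    = maxSubarrayA (x0 :: rest) := by
  rw [List.foldl_cons]
  have hseed : ((fun (st : Int × Int × Int) x =>
        let pref := st.1 + x
        let best := if pref - st.2.1 > st.2.2 then pref - st.2.1 else st.2.2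
        let minpref := if pref < st.2.1 then pref else st.2.1
        (pref, minpref, best)) (0, 0, x0) x0) = (x0, x0 - max x0 0, x0) := by
    simp only [zero_add]
    split_ifs <;> simp_all <;> omega
  simp only [hseed, maxSubarrayA]
  exact scan_eq_kadane rest x0 x0 x0

-- ===== VERDICT =====
theorem core_algorithm_spec : Claim_equal_core_algorithm := by
  intro n m k a _
  unfold Spec_core_algorithm core_algorithm core_algorithm_alt
  apply PySem.List.foldl_congr_mem
  intro ans i hi
  rw [PySem.List.mem_pyRange_one] at hi
  obtain ⟨hi0, him⟩ := hi
  have hm : 0 < m := by omega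
  have hblocks : (if PySem.Int.floordiv ((a.length : Int) - i + m - 1) m < 1 then (1:Int)
      else PySem.Int.floordiv ((a.length : Int) - i + m - 1) m)
      = nBlocks m i (a.length : Int) := by
    unfold nBlocks
    split_ifs <;> omega
  have hA : loopA m k a i (a.length + 1) 0 (PySem.List.slice a (some 0) (some i) ++ [-k])
      = (PySem.List.slice a (some 0) (some i) ++ [-k])
        ++ (PySem.List.pyRange 0 (nBlocks m i (a.length : Int)) 1).flatMap
            (fun s => PySem.List.slice a (some (i + s * m)) (some (i + s * m + m)) ++ [-k]) := by
    have h := loopA_blocks a k m i hm hi0 (a.length + 1) 0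
      (PySem.List.slice a (some 0) (some i) ++ [-k]) le_rfl (nBlocks_pos m i _)
      (by have := nBlocks_le m i (a.length : Int) hm hi0 (by positivity); omega)
    rw [zero_mul] at h
    exact h
  simp only [hA, hblocks, List.flatMap_cons, List.flatMap_map, List.append_assoc]
  rcases hsl : PySem.List.slice a (some 0) (some i) ++
      ([-k] ++ (PySem.List.pyRange 0 (nBlocks m i (a.length : Int)) 1).flatMap
        (fun s => PySem.List.slice a (some (i + s * m)) (some (i + s * m + m)) ++ [-k]))
      with _ | ⟨x0, rest⟩
  · exfalso
    rcases PySem.List.pyRange_one_cons (a := 0) (b := nBlocks m i (a.length : Int))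
        (nBlocks_pos m i _) with h
    simp [h] at hsl
  · simp only [scan_full]
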